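-- pv_equiv track=rewrite | github.com/memesmith1/fastlisp | fastlisp-to-python-compiler.py | convertArrayOfTrueAndFalseToVierosOfKestrelAndKite
-- ===== SOURCE A (Python) =====
-- def convertArrayOfTrueAndFalseToVierosOfKestrelAndKite(boolean_array):
--     result = []
--     for bit in boolean_array:
--         if bit:
--             result.append("(viero kestrel ")
--         else:
--             result.append("(viero kite ")
--     result.append(")" * len(boolean_array))
--     return ''.join(result)
-- ===== SOURCE B (Python) =====
-- def convertArrayOfTrueAndFalseToVierosOfKestrelAndKite(boolean_array):
--     # Wrap inside-out: each bit wraps the expression built so far in one viero call.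
--     s = ""
--     for bit in reversed(boolean_array):
--         s = "(viero " + ("kestrel" if bit else "kite") + " " + s + ")"
--     return s
-- ===== Notes on version B (the rewrite author's own statement) =====
-- stated objective: simpler
-- what changed: B builds the nested expression inside-out with a single string accumulator, each bit wrapping the expression built so far in one complete parenthesised viero call, instead of A's list of open prefixes joined to a separately computed trailing run of closing parens.
import Mathlib
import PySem

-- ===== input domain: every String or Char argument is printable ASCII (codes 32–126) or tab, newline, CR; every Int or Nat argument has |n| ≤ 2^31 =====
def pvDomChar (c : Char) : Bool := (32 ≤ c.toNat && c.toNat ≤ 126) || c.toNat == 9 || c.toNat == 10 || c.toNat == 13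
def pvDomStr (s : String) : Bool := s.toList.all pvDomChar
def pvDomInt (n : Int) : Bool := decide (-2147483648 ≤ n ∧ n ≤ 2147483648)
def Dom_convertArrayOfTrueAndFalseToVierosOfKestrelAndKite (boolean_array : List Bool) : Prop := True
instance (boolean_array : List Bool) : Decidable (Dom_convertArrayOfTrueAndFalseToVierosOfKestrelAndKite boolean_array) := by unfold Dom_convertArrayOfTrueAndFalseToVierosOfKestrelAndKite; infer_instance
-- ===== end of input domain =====

-- B builds the nested expression inside-out with a single wrapping accumulator instead of A's prefix list plus trailing paren run; objective: simpler.

-- ===== PORT A =====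
-- A: collect one opening prefix per bit in a list, append a run of len closing parens, join.
def convertArrayOfTrueAndFalseToVierosOfKestrelAndKite (boolean_array : List Bool) : String :=
  let result : List String :=
    boolean_array.foldl
      (fun r bit => r ++ [if bit then "(viero kestrel " else "(viero kite "]) []
  let result := result ++ [String.ofList (List.replicate boolean_array.length ')')]
  String.join result

-- ===== PORT B =====
-- B: iterate over the reversed array, each bit wrapping the accumulator in one complete
-- parenthesised viero call: s = "(viero " ++ keyword ++ " " ++ s ++ ")".
def convertArrayOfTrueAndFalseToVierosOfKestrelAndKite_alt (boolean_array : List Bool) : String :=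
  boolean_array.reverse.foldl
    (fun s bit => "(viero " ++ (if bit then "kestrel" else "kite") ++ " " ++ s ++ ")") ""

-- ===== PRECONDITION & SPEC =====
def Spec_convertArrayOfTrueAndFalseToVierosOfKestrelAndKite (boolean_array : List Bool) (out : String) : Prop := out = convertArrayOfTrueAndFalseToVierosOfKestrelAndKite_alt boolean_array
instance (boolean_array : List Bool) (out : String) : Decidable (Spec_convertArrayOfTrueAndFalseToVierosOfKestrelAndKite boolean_array out) := by unfold Spec_convertArrayOfTrueAndFalseToVierosOfKestrelAndKite; infer_instance

-- ===== CLAIM (what is proved, stated in full; the proofs are below) =====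
def Claim_equal_convertArrayOfTrueAndFalseToVierosOfKestrelAndKite : Prop := ∀ (boolean_array : List Bool), Dom_convertArrayOfTrueAndFalseToVierosOfKestrelAndKite boolean_array → Spec_convertArrayOfTrueAndFalseToVierosOfKestrelAndKite boolean_array (convertArrayOfTrueAndFalseToVierosOfKestrelAndKite boolean_array)

-- ===== LEMMAS AND PROOFS =====

-- A's prefix string for one bit
def pvPrefix (bit : Bool) : String := if bit then "(viero kestrel " else "(viero kite "

theorem pvFoldlA (l : List Bool) (r : List String) :
    l.foldl (fun r bit => r ++ [if bit then "(viero kestrel " else "(viero kite "]) r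
      = r ++ l.map pvPrefix := by
  induction l generalizing r with
  | nil => simp
  | cons b t ih => simp [List.foldl, ih, pvPrefix]

theorem pvJoinToList (z : String) (l : List String) :
    (l.foldl (· ++ ·) z).toList = z.toList ++ (l.map String.toList).flatten := by
  induction l generalizing z with
  | nil => simp
  | cons x t ih => simp [ih]

theorem pvA_toList (l : List Bool) :
    (convertArrayOfTrueAndFalseToVierosOfKestrelAndKite l).toList
      = (l.map fun b => (pvPrefix b).toList).flatten ++ List.replicate l.length ')' := by
  unfold convertArrayOfTrueAndFalseToVierosOfKestrelAndKite
  simp only [pvFoldlA, List.nil_append, String.join, pvJoinToList]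
  simp [Function.comp_def]

theorem pvB_cons (b : Bool) (t : List Bool) :
    convertArrayOfTrueAndFalseToVierosOfKestrelAndKite_alt (b :: t)
      = "(viero " ++ (if b then "kestrel" else "kite") ++ " "
          ++ convertArrayOfTrueAndFalseToVierosOfKestrelAndKite_alt t ++ ")" := by
  unfold convertArrayOfTrueAndFalseToVierosOfKestrelAndKite_alt
  simp [List.reverse_cons, List.foldl_append]

theorem pvB_toList (l : List Bool) :
    (convertArrayOfTrueAndFalseToVierosOfKestrelAndKite_alt l).toList
      = (l.map fun b => (pvPrefix b).toList).flatten ++ List.replicate l.length ')' := by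
  induction l with
  | nil => decide
  | cons b t ih =>
    rw [pvB_cons]
    cases b <;>
      simp [pvPrefix, ih, List.replicate_succ' , String.toList_append]

theorem pvMain (l : List Bool) :
    convertArrayOfTrueAndFalseToVierosOfKestrelAndKite l
      = convertArrayOfTrueAndFalseToVierosOfKestrelAndKite_alt l := by
  apply String.ext
  rw [pvA_toList, pvB_toList]

-- ===== VERDICT (by name: the statement is the Claim_ definition above) =====
theorem convertArrayOfTrueAndFalseToVierosOfKestrelAndKite_spec : Claim_equal_convertArrayOfTrueAndFalseToVierosOfKestrelAndKite := by
  intro l _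
  exact pvMain l
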